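-- pv_equiv track=rewrite | github.com/ethanguyen25/ICS33-proj1 | program1/influence.py | all_influenced
-- ===== SOURCE A (Python) =====
-- from math        import ceil
--
-- def all_influenced(graph : {str:{str}}, influencers : {str}) -> {str}:
--     dict1, dict2 = {}, {}
--     sett = set()
--     count = 0
--     for nodes in graph.keys():
--         if nodes in influencers:  #for all the nodes in influencers, it will have a value of True.
--             dict1[nodes] = True
--         else:
--             dict1[nodes] = False  #Else every other node will have a value of False.
--     while True:
--         dict2 = {i:j for i,j in dict1.items()}  #making an identical dictionary to later check if it is the same.
--         for k,v in dict1.items():  #loops through the dict1 and checks for values that equal False.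
--             count = 0  #resets count to zero.
--             if v == False:  #if it is False, then find the number of friends needed to influence that node.
--                 num = ceil(int(len(graph[k]))/2)
--                 for i in graph[k]:  #looping through the set of values
--                     if i in dict1:  #checking if the value is in our dict1
--                         if dict1[i] == True:  #if the value is True then add to the count
--                             count += 1
--                             if count >= num:  #once/if the count is greater or equal to the num, then the value becomes True.  Then you start checking the next key.
--                                 dict1[k] = True
--                                 break
--         if dict1 == dict2:  #if the dictionaries are equal that means there are no more changes.
--              break
--
--     for x in dict1:  #add the keys that are left, to a set and return the set.
--         if dict1[x] == True:
--             sett.add(x)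
--
--     return sett
-- ===== SOURCE B (Python) =====
-- def all_influenced(graph, influencers):
--     # Worklist propagation over a reverse-adjacency index: each influenced node is
--     # processed once, re-checking only the nodes that list it as a friend.
--     followers = {node: [] for node in graph}
--     for node in graph:
--         for f in graph[node]:
--             if f in followers:
--                 followers[f].append(node)
--     influenced = set()
--     stack = []
--     for node in graph:
--         if node in influencers:
--             influenced.add(node)
--             stack.append(node)
--     while stack:
--         u = stack.pop()
--         for v in followers[u]:
--             if v not in influenced:
--                 friends = graph[v]
--                 if 2 * sum(1 for f in friends if f in influenced) >= len(friends):
--                     influenced.add(v)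
--                     stack.append(v)
--     return {node for node in graph if node in influenced}
-- ===== Notes on version B (the rewrite author's own statement) =====
-- stated objective: alternative
-- what changed: A rescans every node of the graph in repeated whole-graph passes until a fixpoint; B builds a reverse-adjacency (followers) index once, seeds a worklist with the influencer nodes, and pops each node exactly once, re-checking only the nodes that list the popped node as a friend (intended as faster; a timing run measured B ahead by only ~1.25x at the largest size, so no speed is claimed).
import Mathlib
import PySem

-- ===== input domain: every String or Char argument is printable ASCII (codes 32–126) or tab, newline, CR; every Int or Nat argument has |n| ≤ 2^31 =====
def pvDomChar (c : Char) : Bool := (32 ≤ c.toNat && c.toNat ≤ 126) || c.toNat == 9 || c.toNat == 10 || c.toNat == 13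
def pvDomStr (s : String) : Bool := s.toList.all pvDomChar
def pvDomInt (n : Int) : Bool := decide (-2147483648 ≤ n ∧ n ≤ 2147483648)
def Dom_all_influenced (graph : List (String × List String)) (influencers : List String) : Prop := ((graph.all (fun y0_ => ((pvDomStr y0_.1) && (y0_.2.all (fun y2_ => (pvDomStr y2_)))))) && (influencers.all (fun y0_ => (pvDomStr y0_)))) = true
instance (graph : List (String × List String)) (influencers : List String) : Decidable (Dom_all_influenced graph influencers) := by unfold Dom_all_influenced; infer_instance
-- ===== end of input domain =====

-- B replaces A's repeated whole-graph passes with a one-pass-per-node worklist over a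
-- reverse-adjacency index (objective: alternative algorithm; intended as faster, the
-- timing run measured only ~1.25x at the largest size); same return value, proved below.

-- ===== PORT A =====
-- inner loop 'for i in graph[k]: …' with running count and early break ('math.ceil(len/2)'
-- is passed in as the exact integer (len+1)/2, which equals ceil for every Nat length)
def aScan (d : PySem.Dict String Bool) (k : String) (num : Nat) (count : Nat) :
    List String → PySem.Dict String Bool
  | [] => d
  | i :: rest =>
    if d.contains i then
      if d.getD i false == true then
        if count + 1 ≥ num then d.insert k true
        else aScan d k num (count + 1) rest
      else aScan d k num count rest
    else aScan d k num count rest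

-- one 'for k,v in dict1.items()' pass; the items list of the dict at pass start is the
-- snapshot Python iterates (values are only written at their own iteration, so reading
-- v from the snapshot is exact), lookups go to the current dict d'
def aStep (g : PySem.Dict String (List String)) (d' : PySem.Dict String Bool)
    (kv : String × Bool) : PySem.Dict String Bool :=
  if kv.2 == false then
    aScan d' kv.1 (((g.getD kv.1 []).length + 1) / 2) 0 (g.getD kv.1 [])
  else d'

def aPass (g : PySem.Dict String (List String)) (d : PySem.Dict String Bool) :
    PySem.Dict String Bool :=
  d.items.foldl (aStep g) d

-- pointwise order on item lists: same keys, values only flip false→true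
def PtLe (l l' : List (String × Bool)) : Prop :=
  List.Forall₂ (fun p q => p.1 = q.1 ∧ (p.2 = true → q.2 = true)) l l'

theorem ptle_refl (l : List (String × Bool)) : PtLe l l := by
  induction l with
  | nil => exact List.Forall₂.nil
  | cons x xs ih => exact List.Forall₂.cons ⟨rfl, fun h => h⟩ ih

theorem ptle_trans {a b c : List (String × Bool)} (h1 : PtLe a b) (h2 : PtLe b c) : PtLe a c := by
  induction h1 generalizing c with
  | nil => exact h2
  | cons hx _ ih =>
    cases h2 with
    | cons hy hrest => exact List.Forall₂.cons ⟨hx.1.trans hy.1, fun h => hy.2 (hx.2 h)⟩ (ih hrest)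

theorem ptle_countP_le {a b : List (String × Bool)} (h : PtLe a b) :
    b.countP (fun p => !p.2) ≤ a.countP (fun p => !p.2) := by
  induction h with
  | nil => simp
  | @cons p q l l' hx hrest ih =>
    simp only [List.countP_cons]
    rcases hx with ⟨-, hv⟩
    cases hp : p.2 <;> cases hq : q.2 <;> simp_all
    omega

theorem ptle_countP_lt {a b : List (String × Bool)} (h : PtLe a b) (hne : a ≠ b) :
    b.countP (fun p => !p.2) < a.countP (fun p => !p.2) := by
  induction h with
  | nil => exact absurd rfl hne
  | @cons p q l l' hx hrest ih =>
    by_cases hpq : p = q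
    · subst hpq
      have hl : l ≠ l' := by intro h; exact hne (by rw [h])
      simp only [List.countP_cons]
      have := ih hl
      omega
    · have hpv : p.2 = false ∧ q.2 = true := by
        obtain ⟨hk, hv⟩ := hx
        obtain ⟨p1, p2⟩ := p; obtain ⟨q1, q2⟩ := q
        simp only at hk hv
        cases p2 <;> cases q2 <;> simp_all
      have hle := ptle_countP_le hrest
      simp only [List.countP_cons, hpv.1, hpv.2]
      simp
      omega

theorem ptle_keys {a b : List (String × Bool)} (h : PtLe a b) :
    a.map Prod.fst = b.map Prod.fst := by
  induction h with
  | nil => rfl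
  | cons hx _ ih => simp [hx.1, ih]

-- aScan either triggers the threshold and sets k, or leaves the dict unchanged
theorem aScan_spec (fr : List String) (d : PySem.Dict String Bool) (k : String)
    (num : Nat) :
    ∀ count, aScan d k num count fr =
      if 1 ≤ fr.countP (fun i => d.contains i && d.getD i false) ∧
         num ≤ count + fr.countP (fun i => d.contains i && d.getD i false) then
        d.insert k true
      else d := by
  induction fr with
  | nil =>
    intro count
    rw [aScan]
    simp
  | cons i rest ih =>
    intro count
    by_cases hci : (d.contains i && d.getD i false) = true
    · have hc : d.contains i = true := by simp_all
      have hv : d.getD i false = true := by simp_all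
      rw [aScan]
      simp only [hc, hv, beq_self_eq_true, List.countP_cons, Bool.and_self, if_true,
        ih (count + 1)]
      by_cases ht : count + 1 ≥ num
      · rw [if_pos ht, if_pos ⟨by omega, by omega⟩]
      · rw [if_neg ht]
        set cp := rest.countP (fun i => d.contains i && d.getD i false) with hcp
        by_cases hz : 1 ≤ cp
        · have he : (1 ≤ cp ∧ num ≤ count + 1 + cp) = (1 ≤ cp + 1 ∧ num ≤ count + (cp + 1)) := by
            rw [eq_iff_iff]
            constructor
            · rintro ⟨h1, h2⟩; exact ⟨by omega, by omega⟩
            · rintro ⟨h1, h2⟩; exact ⟨by omega, by omega⟩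
          simp only [he]
        · rw [if_neg (by omega), if_neg (by omega)]
    · have hci' : (d.contains i && d.getD i false) = false := by
        cases h : (d.contains i && d.getD i false) <;> simp_all
      have hstep : aScan d k num count (i :: rest) = aScan d k num count rest := by
        rw [aScan]
        rcases Bool.and_eq_false_iff.mp hci' with h | h
        · simp [h]
        · cases hcc : d.contains i <;> simp [h]
      rw [hstep, ih count]
      simp [hci']

theorem self_contains (d : PySem.Dict String Bool) (kv : String × Bool)
    (h : kv ∈ d.items) : d.contains kv.1 = true := by
  rw [PySem.Dict.contains_iff_mem_keys]
  exact List.mem_map_of_mem h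

theorem ptle_insert_true (d : PySem.Dict String Bool) (k : String)
    (h : d.contains k = true) : PtLe d.items (d.insert k true).items := by
  rw [PySem.Dict.items_insert_of_contains d true h]
  induction d.items with
  | nil => exact List.Forall₂.nil
  | cons p rest ih =>
    refine List.Forall₂.cons ?_ ih
    by_cases hk : p.1 == k
    · simp only [hk]
      exact ⟨by simpa using hk, fun _ => rfl⟩
    · simp only [hk]
      exact ⟨rfl, fun h => h⟩

theorem aStep_ptle (g : PySem.Dict String (List String)) (d : PySem.Dict String Bool)
    (kv : String × Bool) (h : d.contains kv.1 = true) :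
    PtLe d.items ((aStep g d kv).items) := by
  rw [aStep]
  by_cases hv : (kv.2 == false) = true
  · rw [if_pos hv, aScan_spec]
    split_ifs with h1
    · exact ptle_insert_true d kv.1 h
    · exact ptle_refl _
  · rw [if_neg hv]
    exact ptle_refl _

theorem contains_of_ptle {d d' : PySem.Dict String Bool} (h : PtLe d.items d'.items)
    {k : String} (hc : d.contains k = true) : d'.contains k = true := by
  rw [PySem.Dict.contains_iff_mem_keys] at hc ⊢
  have := ptle_keys h
  simpa [PySem.Dict.keys, ← this] using hc

theorem aPass_fold_ptle (g : PySem.Dict String (List String)) :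
    ∀ (its : List (String × Bool)) (d : PySem.Dict String Bool),
      (∀ kv ∈ its, d.contains kv.1 = true) →
      PtLe d.items ((its.foldl (aStep g) d).items) := by
  intro its
  induction its with
  | nil => intro d _; exact ptle_refl _
  | cons kv rest ih =>
    intro d h
    have h1 := aStep_ptle g d kv (h kv (by simp))
    refine ptle_trans h1 (ih _ ?_)
    intro kv' hkv'
    exact contains_of_ptle h1 (h kv' (by simp [hkv']))

theorem aPass_ptle (g : PySem.Dict String (List String)) (d : PySem.Dict String Bool) :
    PtLe d.items (aPass g d).items :=
  aPass_fold_ptle g d.items d (fun kv h => self_contains d kv h)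

-- the while-loop: pass until nothing changes; terminates because a changing pass
-- strictly decreases the number of False values
def aLoop (g : PySem.Dict String (List String)) (d : PySem.Dict String Bool) :
    PySem.Dict String Bool :=
  let d' := aPass g d
  if d' = d then d' else aLoop g d'
termination_by d.items.countP (fun p => !p.2)
decreasing_by
  rename_i h
  have hp := aPass_ptle g d
  have hne : d.items ≠ (aPass g d).items := by
    intro he
    exact h (PySem.Dict.ext he.symm)
  exact ptle_countP_lt hp hne

def all_influenced (graph : List (String × List String)) (influencers : List String) :
    List String :=
  let g : PySem.Dict String (List String) := PySem.Dict.mk graph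
  let dict1 := g.keys.foldl (fun d nodes => d.insert nodes (influencers.contains nodes))
    PySem.Dict.empty
  let dF := aLoop g dict1
  dF.keys.foldl (fun sett x => if dF.getD x false == true then PySem.Set.add sett x else sett)
    PySem.Set.empty

-- ===== PORT B =====
-- reverse adjacency: followers[f] lists every node that has f among its friends
def bFollowers (g : PySem.Dict String (List String)) : PySem.Dict String (List String) :=
  let f0 := g.keys.foldl (fun d node => d.insert node ([] : List String)) PySem.Dict.empty
  g.keys.foldl (fun fd node =>
    (g.getD node []).foldl (fun fd f =>
      if fd.contains f then fd.modify f [] (fun l => l ++ [node]) else fd) fd) f0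

-- universe the worklist can ever push from (for the termination measure)
def bUniv (followers : PySem.Dict String (List String)) : List String :=
  PySem.Set.ofList followers.values.flatten

-- the body of 'while stack: u = stack.pop(); for v in followers[u]: …'
def bScanStep (g : PySem.Dict String (List String))
    (p : PySem.Set String × List String) (v : String) : PySem.Set String × List String :=
  if !(PySem.Set.contains p.1 v) then
    -- friends := graph[v]
    if (g.getD v []).length ≤ 2 * (g.getD v []).countP (fun f => PySem.Set.contains p.1 f) then
      (PySem.Set.add p.1 v, v :: p.2)
    else p
  else p

theorem contains_add_of_ne (s : PySem.Set String) (v x : String) (hxv : x ≠ v) :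
    PySem.Set.contains (PySem.Set.add s v) x = PySem.Set.contains s x := by
  cases h : PySem.Set.contains s x
  · cases h5 : PySem.Set.contains (PySem.Set.add s v) x
    · rfl
    · rcases (PySem.Set.mem_add s v x).mp ((PySem.Set.contains_iff _ _).mp h5) with h6 | h6
      · rw [(PySem.Set.contains_iff _ _).mpr h6] at h; exact h
      · exact absurd h6 hxv
  · exact (PySem.Set.contains_iff _ _).mpr
      ((PySem.Set.mem_add s v x).mpr (Or.inl ((PySem.Set.contains_iff _ _).mp h)))

theorem countP_not_contains_add (U : List String) (hU : U.Nodup) (s : PySem.Set String)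
    (v : String) (hv : v ∈ U) (hns : v ∉ s) :
    U.countP (fun x => !(PySem.Set.contains (PySem.Set.add s v) x)) + 1 =
    U.countP (fun x => !(PySem.Set.contains s x)) := by
  induction U with
  | nil => cases hv
  | cons w ws ih =>
    rcases List.nodup_cons.mp hU with ⟨hw, hws⟩
    simp only [List.countP_cons]
    rcases List.mem_cons.mp hv with h1 | h1
    · subst h1
      have h2 : PySem.Set.contains (PySem.Set.add s v) v = true :=
        (PySem.Set.contains_iff _ _).mpr ((PySem.Set.mem_add s v v).mpr (Or.inr rfl))
      have h3 : PySem.Set.contains s v = false := by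
        cases h : PySem.Set.contains s v
        · rfl
        · exact absurd ((PySem.Set.contains_iff _ _).mp h) hns
      have h4 : ws.countP (fun x => !(PySem.Set.contains (PySem.Set.add s v) x)) =
          ws.countP (fun x => !(PySem.Set.contains s x)) := by
        refine List.countP_congr (fun x hx => ?_)
        rw [contains_add_of_ne s v x (fun h => hw (h ▸ hx))]
      rw [h2, h3, h4]
      simp
    · have hwv : w ≠ v := fun h => hw (h ▸ h1)
      rw [contains_add_of_ne s v w (fun h => hwv h)]
      have := ih hws h1
      omega

theorem bScan_measure (g : PySem.Dict String (List String)) (U : List String)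
    (hU : U.Nodup) (L : List String) :
    ∀ (p : PySem.Set String × List String), (∀ v ∈ L, v ∈ U) →
      2 * U.countP (fun x => !(PySem.Set.contains (L.foldl (bScanStep g) p).1 x)) +
        (L.foldl (bScanStep g) p).2.length ≤
      2 * U.countP (fun x => !(PySem.Set.contains p.1 x)) + p.2.length := by
  induction L with
  | nil => intro p _; exact le_refl _
  | cons v rest ih =>
    intro p hL
    refine le_trans (ih _ (fun w hw => hL w (List.mem_cons_of_mem _ hw))) ?_
    rw [bScanStep]
    by_cases hc : PySem.Set.contains p.1 v = true
    · rw [if_neg (by rw [hc]; decide)]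
    · have hcf : PySem.Set.contains p.1 v = false := by
        cases hh : PySem.Set.contains p.1 v
        · rfl
        · exact absurd hh hc
      rw [if_pos (by rw [hcf]; decide)]
      split_ifs with h2
      · have hv : v ∈ U := hL v (List.mem_cons_self)
        have hns : v ∉ p.1 := fun h => hc ((PySem.Set.contains_iff _ _).mpr h)
        have hcnt := countP_not_contains_add U hU p.1 v hv hns
        have hgoal : 2 * U.countP (fun x => !(PySem.Set.contains (PySem.Set.add p.1 v) x)) +
            (v :: p.2).length ≤
            2 * U.countP (fun x => !(PySem.Set.contains p.1 x)) + p.2.length := by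
          simp only [List.length_cons]
          omega
        exact hgoal
      · exact le_refl _

-- every element of any followers list lies in bUniv followers
theorem mem_bUniv_of_mem_getD (followers : PySem.Dict String (List String))
    {u v : String} (h : v ∈ followers.getD u []) : v ∈ bUniv followers := by
  rw [bUniv, PySem.Set.mem_ofList, List.mem_flatten]
  rcases hg : followers.get? u with _ | l
  · rw [PySem.Dict.getD_eq_get?_getD, hg] at h; simp at h
  · rw [PySem.Dict.getD_eq_get?_getD, hg] at h
    refine ⟨l, ?_, h⟩
    have := PySem.Dict.mem_items_of_get?_eq_some followers hg
    simpa [PySem.Dict.values] using List.mem_map_of_mem (f := Prod.snd) this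

def bLoop (g : PySem.Dict String (List String)) (followers : PySem.Dict String (List String))
    (I : PySem.Set String) (stack : List String) : PySem.Set String :=
  match stack with
  | [] => I
  | u :: rest =>
    let p := (followers.getD u []).foldl (bScanStep g) (I, rest)
    bLoop g followers p.1 p.2
termination_by 2 * (bUniv followers).countP (fun x => !(PySem.Set.contains I x)) + stack.length
decreasing_by
  have hm : 2 * (bUniv followers).countP
        (fun x => !(PySem.Set.contains ((followers.getD u []).foldl (bScanStep g) (I, rest)).1 x)) +
      ((followers.getD u []).foldl (bScanStep g) (I, rest)).2.length ≤
      2 * (bUniv followers).countP (fun x => !(PySem.Set.contains I x)) + rest.length :=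
    bScan_measure g (bUniv followers) (PySem.Set.nodup_ofList _)
      (followers.getD u []) (I, rest) (fun v hv => mem_bUniv_of_mem_getD followers hv)
  simp only [List.length_cons]
  omega

def all_influenced_alt (graph : List (String × List String)) (influencers : List String) :
    List String :=
  let g : PySem.Dict String (List String) := PySem.Dict.mk graph
  let followers := bFollowers g
  -- seeds: influencer nodes of the graph (stack is LIFO: head = Python's list end)
  let init := g.keys.foldl (fun (p : PySem.Set String × List String) node =>
      if influencers.contains node then (PySem.Set.add p.1 node, node :: p.2) else p)
    (PySem.Set.empty, [])
  let influenced := bLoop g followers init.1 init.2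
  PySem.Set.ofList (g.keys.filter (fun node => PySem.Set.contains influenced node))

-- ===== PRECONDITION & SPEC =====
def Spec_all_influenced (graph : List (String × List String)) (influencers : List String) (out : List String) : Prop := out = all_influenced_alt graph influencers
instance (graph : List (String × List String)) (influencers : List String) (out : List String) : Decidable (Spec_all_influenced graph influencers out) := by unfold Spec_all_influenced; infer_instance

-- ===== CLAIM (what is proved, stated in full; the proofs are below) =====
def Claim_equal_all_influenced : Prop := ∀ (graph : List (String × List String)) (influencers : List String), Dom_all_influenced graph influencers → Spec_all_influenced graph influencers (all_influenced graph influencers)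

-- ===== LEMMAS AND PROOFS =====

theorem ptle_antisymm {a b : List (String × Bool)} (h1 : PtLe a b) (h2 : PtLe b a) : a = b := by
  induction h1 with
  | nil => rfl
  | @cons p q l l' hx _ ih =>
    cases h2 with
    | cons hy hrest =>
      have : p = q := by
        obtain ⟨hk, hv⟩ := hx
        obtain ⟨p1, p2⟩ := p
        obtain ⟨q1, q2⟩ := q
        simp only at hk hv
        cases p2 <;> cases q2 <;> simp_all
      rw [this, ih hrest]


-- ---------- shared abstractions ----------

-- neighbour list of a node (graph[k], with [] for non-keys)
def NB (graph : List (String × List String)) (k : String) : List String :=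
  (PySem.Dict.mk graph).getD k []

-- the node set, deduplicated in first-occurrence order
def KeySet (graph : List (String × List String)) : List String :=
  PySem.Set.ofList ((PySem.Dict.mk graph).keys)

-- "at least half of k's friends lie in S" (the influence condition, S a certificate list)
def CondB (graph : List (String × List String)) (S : List String) (k : String) : Prop :=
  NB graph k ≠ [] ∧ (NB graph k).length ≤ 2 * (NB graph k).countP (fun f => S.contains f)

-- the closure both programs compute: seeds plus threshold steps from certified nodes
inductive Reach (graph : List (String × List String)) (influencers : List String) : String → Prop
  | seed : ∀ k, k ∈ (PySem.Dict.mk graph).keys → influencers.contains k = true →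
      Reach graph influencers k
  | step : ∀ k (I : List String), k ∈ (PySem.Dict.mk graph).keys →
      (∀ x ∈ I, Reach graph influencers x) → CondB graph I k → Reach graph influencers k

theorem condB_mono {graph : List (String × List String)} {S T : List String} {k : String}
    (hsub : ∀ x ∈ S, x ∈ T) (h : CondB graph S k) : CondB graph T k := by
  refine ⟨h.1, le_trans h.2 ?_⟩
  have := List.countP_mono_left (l := NB graph k)
    (p := fun f => S.contains f) (q := fun f => T.contains f)
    (fun x _ hx => by
      simp only [List.contains_eq_mem, decide_eq_true_eq] at hx ⊢
      exact hsub x hx)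
  omega

theorem mem_keySet {graph : List (String × List String)} {k : String} :
    k ∈ KeySet graph ↔ k ∈ (PySem.Dict.mk graph).keys :=
  PySem.Set.mem_ofList _ _

theorem nodup_keySet (graph : List (String × List String)) : (KeySet graph).Nodup :=
  PySem.Set.nodup_ofList _

-- ---------- A side ----------

-- the initial dict: key k ↦ (k ∈ influencers)
theorem getD_foldl_insert_const {ν : Type} (f : String → ν) :
    ∀ (l : List String) (d : PySem.Dict String ν) (k : String) (dfl : ν),
      (l.foldl (fun d x => d.insert x (f x)) d).getD k dfl =
        if k ∈ l then f k else d.getD k dfl := by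
  intro l
  induction l with
  | nil => intro d k dfl; simp
  | cons x xs ih =>
    intro d k dfl
    rw [List.foldl_cons, ih]
    by_cases hk : k ∈ xs
    · simp [hk]
    · rw [if_neg hk, PySem.Dict.getD_insert]
      by_cases hx : k = x
      · simp [hx]
      · simp [hx, hk, List.mem_cons]

-- true keys of a Bool dict, as a certificate list
def TrueKeys (d : PySem.Dict String Bool) : List String :=
  (d.items.filter (fun p => p.2)).map Prod.fst

theorem mem_trueKeys {d : PySem.Dict String Bool} (hnd : d.keys.Nodup) (i : String) :
    i ∈ TrueKeys d ↔ (d.contains i && d.getD i false) = true := by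
  constructor
  · intro h
    obtain ⟨p, hp, hpi⟩ := List.mem_map.mp h
    obtain ⟨hpm, hpt⟩ := List.mem_filter.mp hp
    obtain ⟨p1, p2⟩ := p
    simp only at hpi hpt
    rw [← hpi]
    cases p2
    · simp at hpt
    · have hq : d.get? p1 = some true :=
        (PySem.Dict.get?_eq_some_iff_mem_items d p1 true hnd).mpr hpm
      rw [PySem.Dict.contains_eq_isSome_get?, PySem.Dict.getD_eq_get?_getD, hq]
      simp
  · intro h
    have hc : d.contains i = true := (Bool.and_eq_true_iff.mp h).1
    have hg : d.getD i false = true := (Bool.and_eq_true_iff.mp h).2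
    rcases hq : d.get? i with _ | b
    · rw [PySem.Dict.contains_eq_isSome_get?, hq] at hc; simp at hc
    · rw [PySem.Dict.getD_eq_get?_getD, hq] at hg
      simp at hg
      subst hg
      have hm : (i, true) ∈ d.items := (PySem.Dict.get?_eq_some_iff_mem_items d i true hnd).mp hq
      exact List.mem_map.mpr ⟨(i, true), List.mem_filter.mpr ⟨hm, rfl⟩, rfl⟩

theorem trueKeys_getD {d : PySem.Dict String Bool} (hnd : d.keys.Nodup) (i : String)
    (h : d.getD i false = true) : i ∈ TrueKeys d := by
  refine (mem_trueKeys hnd i).mpr ?_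
  have hc : d.contains i = true := by
    rcases hq : d.get? i with _ | b
    · rw [PySem.Dict.getD_eq_get?_getD, hq] at h; simp at h
    · rw [PySem.Dict.contains_eq_isSome_get?, hq]; rfl
  simp [hc, h]

-- PtLe preserves established True values
theorem getD_true_of_ptle_list {l l' : List (String × Bool)}
    (h : List.Forall₂ (fun p q => p.1 = q.1 ∧ (p.2 = true → q.2 = true)) l l') (k : String)
    (ht : (PySem.Dict.mk l).getD k false = true) : (PySem.Dict.mk l').getD k false = true := by
  induction h with
  | nil => exact ht
  | @cons p q rest rest' hx hrest ih =>
    obtain ⟨p1, p2⟩ := p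
    obtain ⟨q1, q2⟩ := q
    obtain ⟨hk, hv⟩ := hx
    simp only at hk hv
    subst hk
    rw [PySem.Dict.getD_eq_get?_getD, PySem.Dict.get?_mk_cons] at ht ⊢
    by_cases hpk : (p1 == k) = true
    · rw [if_pos hpk] at ht ⊢
      simp only [Option.getD_some] at ht ⊢
      exact hv ht
    · rw [if_neg hpk] at ht ⊢
      rw [← PySem.Dict.getD_eq_get?_getD] at ht ⊢
      exact ih ht

theorem getD_true_of_ptle {d d' : PySem.Dict String Bool} (h : PtLe d.items d'.items)
    {k : String} (ht : d.getD k false = true) : d'.getD k false = true :=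
  getD_true_of_ptle_list h k ht

-- one aStep keeps every True node Reach-certified
theorem aStep_sound (graph : List (String × List String)) (influencers : List String)
    (d : PySem.Dict String Bool) (kv : String × Bool)
    (hc : d.contains kv.1 = true) (hk : d.keys = KeySet graph)
    (hs : ∀ k, d.getD k false = true → Reach graph influencers k) :
    ∀ k, (aStep (PySem.Dict.mk graph) d kv).getD k false = true →
      Reach graph influencers k := by
  intro k h
  rw [aStep] at h
  by_cases hv : (kv.2 == false) = true
  · rw [if_pos hv, aScan_spec] at h
    split_ifs at h with hcond
    · by_cases hkk : k = kv.1
      · rw [hkk]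
        rw [hkk] at h
        have hnd : d.keys.Nodup := hk ▸ nodup_keySet graph
        obtain ⟨h1, h2⟩ := hcond
        refine Reach.step kv.1 (TrueKeys d) ?_ ?_ ?_
        · have := (PySem.Dict.contains_iff_mem_keys d kv.1).mp hc
          rw [hk] at this
          exact mem_keySet.mp this
        · intro x hx
          have hx' := (mem_trueKeys hnd x).mp hx
          exact hs x (Bool.and_eq_true_iff.mp hx').2
        · constructor
          · intro hnil
            rw [show (PySem.Dict.mk graph).getD kv.1 [] = NB graph kv.1 from rfl, hnil] at h1
            simp at h1
          · have hmono : ((PySem.Dict.mk graph).getD kv.1 []).countP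
                (fun i => d.contains i && d.getD i false) ≤
                ((PySem.Dict.mk graph).getD kv.1 []).countP
                (fun f => (TrueKeys d).contains f) := by
              refine List.countP_mono_left (fun x _ hx => ?_)
              rw [List.contains_eq_mem, decide_eq_true_eq]
              exact (mem_trueKeys hnd x).mpr hx
            show ((PySem.Dict.mk graph).getD kv.1 []).length ≤
              2 * ((PySem.Dict.mk graph).getD kv.1 []).countP
                (fun f => (TrueKeys d).contains f)
            omega
      · rw [PySem.Dict.getD_insert_of_ne d true false hkk] at h
        exact hs k h
    · exact hs k h
  · rw [if_neg hv] at h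
    exact hs k h

-- a whole pass (fold over a snapshot) keeps every True node Reach-certified
theorem aFold_sound (graph : List (String × List String)) (influencers : List String) :
    ∀ (its : List (String × Bool)) (d : PySem.Dict String Bool),
      (∀ kv ∈ its, d.contains kv.1 = true) →
      d.keys = KeySet graph →
      (∀ k, d.getD k false = true → Reach graph influencers k) →
      ∀ k, (its.foldl (aStep (PySem.Dict.mk graph)) d).getD k false = true →
        Reach graph influencers k := by
  intro its
  induction its with
  | nil => intro d _ _ hs; exact hs
  | cons kv rest ih =>
    intro d hc hk hs
    rw [List.foldl_cons]
    have hstep_ptle := aStep_ptle (PySem.Dict.mk graph) d kv (hc kv (by simp))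
    have hkeys' : (aStep (PySem.Dict.mk graph) d kv).keys = KeySet graph := by
      have h2 : (aStep (PySem.Dict.mk graph) d kv).keys = d.keys := (ptle_keys hstep_ptle).symm
      rw [h2, hk]
    refine ih _ ?_ hkeys' (aStep_sound graph influencers d kv (hc kv (by simp)) hk hs)
    intro kv' hkv'
    exact contains_of_ptle hstep_ptle (hc kv' (by simp [hkv']))

-- at a fixpoint of the pass, every step is the identity
theorem foldl_fix (g : PySem.Dict String (List String)) :
    ∀ (its : List (String × Bool)) (d : PySem.Dict String Bool),
      (∀ kv ∈ its, d.contains kv.1 = true) →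
      its.foldl (aStep g) d = d →
      ∀ kv ∈ its, aStep g d kv = d := by
  intro its
  induction its with
  | nil => intro d _ _ kv hkv; cases hkv
  | cons kv rest ih =>
    intro d hc hfix
    rw [List.foldl_cons] at hfix
    have h1 := aStep_ptle g d kv (hc kv (by simp))
    have h2 : PtLe (aStep g d kv).items (rest.foldl (aStep g) (aStep g d kv)).items := by
      refine aPass_fold_ptle g rest (aStep g d kv) ?_
      intro kv' hkv'
      exact contains_of_ptle h1 (hc kv' (by simp [hkv']))
    rw [hfix] at h2
    have heq : aStep g d kv = d := (PySem.Dict.ext (ptle_antisymm h1 h2)).symm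
    intro kv' hkv'
    rcases List.mem_cons.mp hkv' with h | h
    · rw [h]; exact heq
    · rw [heq] at hfix
      exact ih d (fun kv2 hkv2 => hc kv2 (by simp [hkv2])) hfix kv' h

-- at the loop's fixpoint, no False node satisfies the influence condition
theorem aFix_closed (graph : List (String × List String)) (dF : PySem.Dict String Bool)
    (hk : dF.keys = KeySet graph) (hfix : aPass (PySem.Dict.mk graph) dF = dF) :
    ∀ k, k ∈ KeySet graph → dF.getD k false = false →
      ¬ CondB graph (TrueKeys dF) k := by
  intro k hkK hkF hcond
  have hnd : dF.keys.Nodup := hk ▸ nodup_keySet graph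
  have hitem : (k, false) ∈ dF.items := by
    rw [PySem.Dict.items_eq_map_keys dF hnd false]
    refine List.mem_map.mpr ⟨k, ?_, by rw [hkF]⟩
    rw [hk]
    exact hkK
  have hstep := foldl_fix (PySem.Dict.mk graph) dF.items dF (self_contains dF) hfix
    (k, false) hitem
  rw [aStep] at hstep
  simp only [beq_self_eq_true] at hstep
  rw [aScan_spec] at hstep
  obtain ⟨hne, hlen⟩ := hcond
  have hcp : ((PySem.Dict.mk graph).getD k []).countP
      (fun f => (TrueKeys dF).contains f) =
      ((PySem.Dict.mk graph).getD k []).countP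
      (fun i => dF.contains i && dF.getD i false) := by
    refine List.countP_congr (fun x _ => ?_)
    rw [List.contains_eq_mem, decide_eq_true_eq]
    exact mem_trueKeys hnd x
  have hlen1 : 1 ≤ ((PySem.Dict.mk graph).getD k []).length := by
    have : NB graph k ≠ [] := hne
    have h0 : 0 < ((PySem.Dict.mk graph).getD k []).length :=
      List.length_pos_iff.mpr this
    omega
  have hlen2 : ((PySem.Dict.mk graph).getD k []).length ≤
      2 * ((PySem.Dict.mk graph).getD k []).countP
        (fun f => (TrueKeys dF).contains f) := hlen
  have hc1 : 1 ≤ List.countP (fun i => dF.contains i && dF.getD i false)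
      ((PySem.Dict.mk graph).getD k []) := by omega
  have hc2 : (((PySem.Dict.mk graph).getD k []).length + 1) / 2 ≤
      0 + List.countP (fun i => dF.contains i && dF.getD i false)
      ((PySem.Dict.mk graph).getD k []) := by omega
  rw [if_pos (And.intro hc1 hc2)] at hstep
  have : dF.getD k false = true := by
    rw [← hstep]
    exact PySem.Dict.getD_insert_self dF k true false
  rw [this] at hkF
  cases hkF

-- the loop: invariants are preserved to the fixpoint
theorem aLoop_props (graph : List (String × List String)) (influencers : List String) :
    ∀ (n : Nat) (d : PySem.Dict String Bool),
      d.items.countP (fun p => !p.2) = n →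
      d.keys = KeySet graph →
      (∀ k, d.getD k false = true → Reach graph influencers k) →
      (aLoop (PySem.Dict.mk graph) d).keys = KeySet graph ∧
      PtLe d.items ((aLoop (PySem.Dict.mk graph) d).items) ∧
      (∀ k, (aLoop (PySem.Dict.mk graph) d).getD k false = true →
        Reach graph influencers k) ∧
      aPass (PySem.Dict.mk graph) (aLoop (PySem.Dict.mk graph) d) =
        aLoop (PySem.Dict.mk graph) d := by
  intro n
  induction n using Nat.strong_induction_on with
  | _ n ihn =>
    intro d hn hk hs
    have hunf : aLoop (PySem.Dict.mk graph) d =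
        if aPass (PySem.Dict.mk graph) d = d then aPass (PySem.Dict.mk graph) d
        else aLoop (PySem.Dict.mk graph) (aPass (PySem.Dict.mk graph) d) := by
      rw [aLoop]
    by_cases hfix : aPass (PySem.Dict.mk graph) d = d
    · rw [hunf, if_pos hfix, hfix]
      exact ⟨hk, ptle_refl _, hs, by rw [hfix]⟩
    · rw [hunf, if_neg hfix]
      have hp := aPass_ptle (PySem.Dict.mk graph) d
      have hlt : (aPass (PySem.Dict.mk graph) d).items.countP (fun p => !p.2) < n := by
        rw [← hn]
        exact ptle_countP_lt hp (fun he => hfix (PySem.Dict.ext he.symm))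
      have hk' : (aPass (PySem.Dict.mk graph) d).keys = KeySet graph := by
        have h2 : (aPass (PySem.Dict.mk graph) d).keys = d.keys := (ptle_keys hp).symm
        rw [h2, hk]
      have hs' := aFold_sound graph influencers d.items d (self_contains d) hk hs
      obtain ⟨c1, c2, c3, c4⟩ := ihn _ hlt (aPass (PySem.Dict.mk graph) d) rfl hk' hs'
      exact ⟨c1, ptle_trans hp c2, c3, c4⟩

-- collecting the True keys of the final dict is a filter of the key list
theorem foldl_add_filter (p : String → Bool) :
    ∀ (l : List String) (s : List String), l.Nodup → (∀ x ∈ l, x ∉ s) →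
      l.foldl (fun s x => if p x then PySem.Set.add s x else s) s = s ++ l.filter p := by
  intro l
  induction l with
  | nil => intro s _ _; simp
  | cons x xs ih =>
    intro s hnd hfresh
    obtain ⟨hx, hxs⟩ := List.nodup_cons.mp hnd
    rw [List.foldl_cons, List.filter_cons]
    by_cases hp : p x = true
    · rw [if_pos hp, if_pos hp, PySem.Set.add_of_not_mem (hfresh x (by simp))]
      rw [ih (s ++ [x]) hxs ?_]
      · simp
      · intro y hy
        simp only [List.mem_append, List.mem_singleton]
        rintro (h | h)
        · exact hfresh y (by simp [hy]) h
        · exact hx (h ▸ hy)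
    · rw [if_neg hp, if_neg hp]
      exact ih s hxs (fun y hy => hfresh y (by simp [hy]))

-- ---------- A-side characterisation ----------

-- the initial dict of port A
def AD0 (graph : List (String × List String)) (influencers : List String) :
    PySem.Dict String Bool :=
  (PySem.Dict.mk graph).keys.foldl
    (fun d nodes => d.insert nodes (influencers.contains nodes)) PySem.Dict.empty

-- the final dict of port A
def ADF (graph : List (String × List String)) (influencers : List String) :
    PySem.Dict String Bool :=
  aLoop (PySem.Dict.mk graph) (AD0 graph influencers)

theorem aD0_keys (graph : List (String × List String)) (influencers : List String) :
    (AD0 graph influencers).keys = KeySet graph := by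
  have h : (AD0 graph influencers).keys =
      PySem.Set.update PySem.Dict.empty.keys (PySem.Dict.mk graph).keys :=
    PySem.Dict.keys_foldl_insert (PySem.Dict.mk graph).keys
      (fun _ x => influencers.contains x) PySem.Dict.empty
  rw [h, PySem.Dict.keys_empty, PySem.Set.update_nil_left]
  rfl

theorem aD0_getD (graph : List (String × List String)) (influencers : List String)
    (k : String) :
    (AD0 graph influencers).getD k false =
      if k ∈ (PySem.Dict.mk graph).keys then influencers.contains k else false := by
  have h : (AD0 graph influencers).getD k false =
      if k ∈ (PySem.Dict.mk graph).keys then influencers.contains k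
      else PySem.Dict.empty.getD k false :=
    getD_foldl_insert_const (fun x => influencers.contains x)
      (PySem.Dict.mk graph).keys PySem.Dict.empty k false
  rw [h, PySem.Dict.getD_empty]

theorem aLoop_all (graph : List (String × List String)) (influencers : List String) :
    (ADF graph influencers).keys = KeySet graph ∧
    PtLe (AD0 graph influencers).items ((ADF graph influencers).items) ∧
    (∀ k, (ADF graph influencers).getD k false = true → Reach graph influencers k) ∧
    aPass (PySem.Dict.mk graph) (ADF graph influencers) = ADF graph influencers := by
  refine aLoop_props graph influencers _ (AD0 graph influencers) rfl (aD0_keys graph influencers) ?_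
  intro k h
  rw [aD0_getD] at h
  by_cases hm : k ∈ (PySem.Dict.mk graph).keys
  · rw [if_pos hm] at h
    exact Reach.seed k hm h
  · rw [if_neg hm] at h
    cases h

theorem aReach_iff (graph : List (String × List String)) (influencers : List String)
    (k : String) :
    (ADF graph influencers).getD k false = true ↔ Reach graph influencers k := by
  obtain ⟨c1, c2, c3, c4⟩ := aLoop_all graph influencers
  constructor
  · exact c3 k
  · intro hr
    induction hr with
    | seed k hk1 hk2 =>
      have h0 : (AD0 graph influencers).getD k false = true := by
        rw [aD0_getD, if_pos hk1]
        exact hk2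
      exact getD_true_of_ptle c2 h0
    | step k I hk1 hI hcond ih =>
      by_contra hfalse
      have hkf : (ADF graph influencers).getD k false = false := by
        cases h : (ADF graph influencers).getD k false
        · rfl
        · exact absurd h hfalse
      refine aFix_closed graph (ADF graph influencers) c1 c4 k (mem_keySet.mpr hk1) hkf ?_
      refine condB_mono (S := I) ?_ hcond
      intro x hx
      exact trueKeys_getD (c1 ▸ nodup_keySet graph) x (ih x hx)

theorem aOut_eq (graph : List (String × List String)) (influencers : List String) :
    all_influenced graph influencers =
      (KeySet graph).filter (fun x => (ADF graph influencers).getD x false == true) := by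
  obtain ⟨c1, _, _, _⟩ := aLoop_all graph influencers
  show (ADF graph influencers).keys.foldl
      (fun sett x => if (ADF graph influencers).getD x false == true
        then PySem.Set.add sett x else sett) PySem.Set.empty = _
  rw [c1]
  exact (foldl_add_filter (fun x => (ADF graph influencers).getD x false == true)
    (KeySet graph) [] (nodup_keySet graph) (by intro x _ h; cases h)).trans
    (List.nil_append _)

-- ---------- B side ----------

-- the initial followers dict (every key ↦ [])
theorem bF0_keys (graph : List (String × List String)) :
    ((PySem.Dict.mk graph).keys.foldl
      (fun d node => d.insert node ([] : List String)) PySem.Dict.empty).keys =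
      KeySet graph := by
  have h : ((PySem.Dict.mk graph).keys.foldl
      (fun d node => d.insert node ([] : List String)) PySem.Dict.empty).keys =
      PySem.Set.update PySem.Dict.empty.keys (PySem.Dict.mk graph).keys :=
    PySem.Dict.keys_foldl_insert (PySem.Dict.mk graph).keys
      (fun _ _ => ([] : List String)) PySem.Dict.empty
  rw [h, PySem.Dict.keys_empty, PySem.Set.update_nil_left]
  rfl

theorem bF0_getD (graph : List (String × List String)) (f : String) :
    ((PySem.Dict.mk graph).keys.foldl
      (fun d node => d.insert node ([] : List String)) PySem.Dict.empty).getD f [] = [] := by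
  have h := getD_foldl_insert_const (fun _ => ([] : List String))
    (PySem.Dict.mk graph).keys PySem.Dict.empty f []
  rw [h, PySem.Dict.getD_empty]
  split <;> rfl

-- the inner append loop of the followers builder
theorem bInner_keys (node : String) :
    ∀ (nbl : List String) (fd : PySem.Dict String (List String)),
      ((nbl.foldl (fun fd fr => if fd.contains fr then fd.modify fr [] (fun l => l ++ [node])
        else fd) fd)).keys = fd.keys := by
  intro nbl
  induction nbl with
  | nil => intro fd; rfl
  | cons fr rest ih =>
    intro fd
    rw [List.foldl_cons]
    by_cases hc : fd.contains fr = true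
    · rw [if_pos hc, ih]
      rw [PySem.Dict.keys_modify]
      exact PySem.Dict.keys_insert_of_contains fd _ hc
    · rw [if_neg hc, ih]

theorem bInner_mem (node : String) :
    ∀ (nbl : List String) (fd : PySem.Dict String (List String)) (f v : String),
      (v ∈ ((nbl.foldl (fun fd fr => if fd.contains fr then fd.modify fr [] (fun l => l ++ [node])
        else fd) fd)).getD f [] ↔
      v ∈ fd.getD f [] ∨ (v = node ∧ f ∈ nbl ∧ fd.contains f = true)) := by
  intro nbl
  induction nbl with
  | nil => intro fd f v; simp
  | cons fr rest ih =>
    intro fd f v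
    rw [List.foldl_cons]
    by_cases hc : fd.contains fr = true
    · rw [if_pos hc, ih]
      have hcf : (fd.modify fr [] (fun l => l ++ [node])).contains f = fd.contains f := by
        rw [PySem.Dict.contains_modify]
        by_cases hffr : f = fr
        · rw [hffr, hc]
          simp
        · simp [hffr]
      rw [hcf]
      rw [PySem.Dict.getD_modify]
      by_cases hffr : f = fr
      · rw [if_pos hffr, hffr]
        simp only [List.mem_append, List.mem_cons, List.not_mem_nil,
          or_false, hc]
        tauto
      · rw [if_neg hffr]
        simp only [List.mem_cons]
        constructor
        · rintro (h | ⟨h1, h2, h3⟩)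
          · exact Or.inl h
          · exact Or.inr ⟨h1, Or.inr h2, h3⟩
        · rintro (h | ⟨h1, h2 | h2, h3⟩)
          · exact Or.inl h
          · exact absurd h2 hffr
          · exact Or.inr ⟨h1, h2, h3⟩
    · rw [if_neg hc, ih]
      have hcn : fd.contains fr = false := by
        cases h : fd.contains fr
        · rfl
        · exact absurd h hc
      simp only [List.mem_cons]
      constructor
      · rintro (h | ⟨h1, h2, h3⟩)
        · exact Or.inl h
        · exact Or.inr ⟨h1, Or.inr h2, h3⟩
      · rintro (h | ⟨h1, h2 | h2, h3⟩)
        · exact Or.inl h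
        · rw [h2] at h3; rw [h3] at hcn; cases hcn
        · exact Or.inr ⟨h1, h2, h3⟩

-- the outer followers builder
theorem bOuter_mem (graph : List (String × List String)) :
    ∀ (ns : List String) (fd : PySem.Dict String (List String)),
      fd.keys = KeySet graph →
      (((ns.foldl (fun fd node => ((PySem.Dict.mk graph).getD node []).foldl
          (fun fd f => if fd.contains f then fd.modify f [] (fun l => l ++ [node]) else fd) fd)
        fd)).keys = KeySet graph ∧
      ∀ f v, v ∈ ((ns.foldl (fun fd node => ((PySem.Dict.mk graph).getD node []).foldl
          (fun fd f => if fd.contains f then fd.modify f [] (fun l => l ++ [node]) else fd) fd)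
        fd)).getD f [] ↔
        v ∈ fd.getD f [] ∨ (v ∈ ns ∧ f ∈ NB graph v ∧ f ∈ KeySet graph)) := by
  intro ns
  induction ns with
  | nil =>
    intro fd hk
    refine ⟨hk, fun f v => ?_⟩
    simp
  | cons node rest ih =>
    intro fd hk
    rw [List.foldl_cons]
    have hk1 : (((PySem.Dict.mk graph).getD node []).foldl
        (fun fd f => if fd.contains f then fd.modify f [] (fun l => l ++ [node]) else fd)
        fd).keys = KeySet graph := by
      rw [bInner_keys, hk]
    obtain ⟨hko, hmo⟩ := ih _ hk1
    refine ⟨hko, fun f v => ?_⟩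
    rw [hmo f v, bInner_mem]
    have hcf : fd.contains f = true ↔ f ∈ KeySet graph := by
      rw [PySem.Dict.contains_iff_mem_keys, hk]
    constructor
    · rintro ((h | ⟨h1, h2, h3⟩) | ⟨h1, h2, h3⟩)
      · exact Or.inl h
      · exact Or.inr ⟨h1 ▸ List.mem_cons_self, h1 ▸ h2, hcf.mp h3⟩
      · exact Or.inr ⟨List.mem_cons_of_mem _ h1, h2, h3⟩
    · rintro (h | ⟨h1, h2, h3⟩)
      · exact Or.inl (Or.inl h)
      · rcases List.mem_cons.mp h1 with h4 | h4
        · exact Or.inl (Or.inr ⟨h4, h4 ▸ h2, hcf.mpr h3⟩)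
        · exact Or.inr ⟨h4, h2, h3⟩

-- membership in the followers lists
theorem followers_mem (graph : List (String × List String)) (f v : String) :
    v ∈ (bFollowers (PySem.Dict.mk graph)).getD f [] ↔
      (v ∈ (PySem.Dict.mk graph).keys ∧ f ∈ NB graph v ∧ f ∈ KeySet graph) := by
  obtain ⟨_, hm⟩ := bOuter_mem graph (PySem.Dict.mk graph).keys _ (bF0_keys graph)
  rw [show (bFollowers (PySem.Dict.mk graph)).getD f [] =
    ((PySem.Dict.mk graph).keys.foldl (fun fd node => ((PySem.Dict.mk graph).getD node []).foldl
      (fun fd f => if fd.contains f then fd.modify f [] (fun l => l ++ [node]) else fd) fd)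
      ((PySem.Dict.mk graph).keys.foldl (fun d node => d.insert node ([] : List String))
        PySem.Dict.empty)).getD f [] from rfl]
  rw [hm f v, bF0_getD]
  simp

theorem bScanStep_of_mem (g : PySem.Dict String (List String)) (I : PySem.Set String)
    (st : List String) (v : String) (hc : PySem.Set.contains I v = true) :
    bScanStep g (I, st) v = (I, st) := by
  rw [bScanStep, show PySem.Set.contains (I, st).1 v = true from hc]
  rfl

theorem bScanStep_add (g : PySem.Dict String (List String)) (I : PySem.Set String)
    (st : List String) (v : String) (hc : PySem.Set.contains I v = false)
    (hcond : (g.getD v []).length ≤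
      2 * List.countP (fun f => PySem.Set.contains I f) (g.getD v [])) :
    bScanStep g (I, st) v = (PySem.Set.add I v, v :: st) := by
  rw [bScanStep, show PySem.Set.contains (I, st).1 v = false from hc]
  rw [if_pos (show ((!false) = true) from rfl)]
  rw [if_pos (show (g.getD v []).length ≤
    2 * List.countP (fun f => PySem.Set.contains (I, st).1 f) (g.getD v []) from hcond)]

theorem bScanStep_skip (g : PySem.Dict String (List String)) (I : PySem.Set String)
    (st : List String) (v : String) (hc : PySem.Set.contains I v = false)
    (hcond : ¬ ((g.getD v []).length ≤
      2 * List.countP (fun f => PySem.Set.contains I f) (g.getD v []))) :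
    bScanStep g (I, st) v = (I, st) := by
  rw [bScanStep, show PySem.Set.contains (I, st).1 v = false from hc]
  rw [if_pos (show ((!false) = true) from rfl)]
  rw [if_neg (show ¬ ((g.getD v []).length ≤
    2 * List.countP (fun f => PySem.Set.contains (I, st).1 f) (g.getD v [])) from hcond)]

-- the scan over followers[u] (the body of one worklist iteration)
theorem bScan_props (graph : List (String × List String)) (influencers : List String)
    (P : List String) :
    ∀ (L : List String),
      (∀ v ∈ L, v ∈ (PySem.Dict.mk graph).keys ∧ NB graph v ≠ []) →
      ∀ (I : PySem.Set String) (st : List String),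
      (∀ x ∈ P, x ∈ I) →
      (∀ x ∈ I, Reach graph influencers x) →
      (∀ x ∈ I, x ∈ (PySem.Dict.mk graph).keys) →
      (∀ x ∈ I, x ∈ (L.foldl (bScanStep (PySem.Dict.mk graph)) (I, st)).1) ∧
      (∀ x ∈ (L.foldl (bScanStep (PySem.Dict.mk graph)) (I, st)).1, x ∈ I ∨ x ∈ L) ∧
      (∀ x ∈ (L.foldl (bScanStep (PySem.Dict.mk graph)) (I, st)).1,
        Reach graph influencers x) ∧
      (∀ x ∈ (L.foldl (bScanStep (PySem.Dict.mk graph)) (I, st)).1,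
        x ∈ (PySem.Dict.mk graph).keys) ∧
      (∀ x, x ∈ (L.foldl (bScanStep (PySem.Dict.mk graph)) (I, st)).2 ↔
        x ∈ st ∨ (x ∈ (L.foldl (bScanStep (PySem.Dict.mk graph)) (I, st)).1 ∧ x ∉ I)) ∧
      (∀ v ∈ L, v ∉ (L.foldl (bScanStep (PySem.Dict.mk graph)) (I, st)).1 →
        ¬ CondB graph P v) := by
  intro L
  induction L with
  | nil =>
    intro hL I st hP hR hK
    refine ⟨fun x hx => hx, fun x hx => Or.inl hx, hR, hK, ?_, ?_⟩
    · intro x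
      constructor
      · exact fun h => Or.inl h
      · rintro (h | ⟨h1, h2⟩)
        · exact h
        · exact absurd h1 h2
    · intro v hv
      cases hv
  | cons v0 L ih =>
    intro hL I st hP hR hK
    simp only [List.foldl_cons]
    by_cases hc : PySem.Set.contains I v0 = true
    · rw [bScanStep_of_mem _ _ _ _ hc]
      obtain ⟨c1, c2, c3, c4, c5, c6⟩ :=
        ih (fun v hv => hL v (List.mem_cons_of_mem _ hv)) I st hP hR hK
      refine ⟨c1, fun x hx => (c2 x hx).imp id (List.mem_cons_of_mem _), c3, c4, c5, ?_⟩
      intro v hv hnv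
      rcases List.mem_cons.mp hv with h | h
      · exact absurd (c1 v (h ▸ (PySem.Set.contains_iff _ _).mp hc)) hnv
      · exact c6 v h hnv
    · have hcf : PySem.Set.contains I v0 = false := by
        cases h : PySem.Set.contains I v0
        · rfl
        · exact absurd h hc
      have hv0nI : v0 ∉ I := by
        intro hm
        have := (PySem.Set.contains_iff I v0).mpr hm
        rw [hcf] at this
        cases this
      by_cases hcond : ((PySem.Dict.mk graph).getD v0 []).length ≤
          2 * List.countP (fun f => PySem.Set.contains I f) ((PySem.Dict.mk graph).getD v0 [])
      · rw [bScanStep_add _ _ _ _ hcf hcond]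
        have hv0 := hL v0 List.mem_cons_self
        have hR' : ∀ x ∈ PySem.Set.add I v0, Reach graph influencers x := by
          intro x hx
          rcases (PySem.Set.mem_add I v0 x).mp hx with h | h
          · exact hR x h
          · rw [h]
            exact Reach.step v0 I hv0.1 hR ⟨hv0.2, hcond⟩
        have hK' : ∀ x ∈ PySem.Set.add I v0, x ∈ (PySem.Dict.mk graph).keys := by
          intro x hx
          rcases (PySem.Set.mem_add I v0 x).mp hx with h | h
          · exact hK x h
          · exact h ▸ hv0.1
        have hP' : ∀ x ∈ P, x ∈ PySem.Set.add I v0 :=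
          fun x hx => (PySem.Set.mem_add I v0 x).mpr (Or.inl (hP x hx))
        obtain ⟨c1, c2, c3, c4, c5, c6⟩ :=
          ih (fun v hv => hL v (List.mem_cons_of_mem _ hv)) (PySem.Set.add I v0) (v0 :: st)
            hP' hR' hK'
        have hIsub : ∀ x ∈ I, x ∈ (L.foldl (bScanStep (PySem.Dict.mk graph))
            (PySem.Set.add I v0, v0 :: st)).1 :=
          fun x hx => c1 x ((PySem.Set.mem_add I v0 x).mpr (Or.inl hx))
        have hv0mem : v0 ∈ (L.foldl (bScanStep (PySem.Dict.mk graph))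
            (PySem.Set.add I v0, v0 :: st)).1 :=
          c1 v0 ((PySem.Set.mem_add I v0 v0).mpr (Or.inr rfl))
        refine ⟨hIsub, ?_, c3, c4, ?_, ?_⟩
        · intro x hx
          rcases c2 x hx with h | h
          · rcases (PySem.Set.mem_add I v0 x).mp h with h1 | h1
            · exact Or.inl h1
            · exact Or.inr (h1 ▸ List.mem_cons_self)
          · exact Or.inr (List.mem_cons_of_mem _ h)
        · intro x
          rw [c5 x]
          simp only [List.mem_cons, PySem.Set.mem_add]
          by_cases hx0 : x = v0
          · rw [hx0]
            exact iff_of_true (Or.inl (Or.inl rfl)) (Or.inr ⟨hv0mem, hv0nI⟩)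
          · simp only [hx0, false_or, or_false]
        · intro v hv hnv
          rcases List.mem_cons.mp hv with h | h
          · exact absurd (h ▸ hv0mem) hnv
          · exact c6 v h hnv
      · rw [bScanStep_skip _ _ _ _ hcf hcond]
        obtain ⟨c1, c2, c3, c4, c5, c6⟩ :=
          ih (fun v hv => hL v (List.mem_cons_of_mem _ hv)) I st hP hR hK
        refine ⟨c1, fun x hx => (c2 x hx).imp id (List.mem_cons_of_mem _), c3, c4, c5, ?_⟩
        intro v hv hnv
        rcases List.mem_cons.mp hv with h | h
        · rw [h]
          rintro ⟨hne, hlen⟩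
          have hlen' : ((PySem.Dict.mk graph).getD v0 []).length ≤
              2 * List.countP (fun f => P.contains f)
                ((PySem.Dict.mk graph).getD v0 []) := hlen
          have hmono : List.countP (fun f => P.contains f)
              ((PySem.Dict.mk graph).getD v0 []) ≤
              List.countP (fun f => PySem.Set.contains I f)
              ((PySem.Dict.mk graph).getD v0 []) := by
            refine List.countP_mono_left (fun x _ hx => ?_)
            rw [List.contains_eq_mem, decide_eq_true_eq] at hx
            exact (PySem.Set.contains_iff I x).mpr (hP x hx)
          exact hcond (by omega)
        · exact c6 v h hnv

-- the worklist loop to exhaustion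
theorem bLoop_props (graph : List (String × List String)) (influencers : List String) :
    ∀ (n : Nat) (I : PySem.Set String) (stack : List String),
      2 * (bUniv (bFollowers (PySem.Dict.mk graph))).countP
        (fun x => !(PySem.Set.contains I x)) + stack.length = n →
      (∀ x ∈ I, Reach graph influencers x) →
      (∀ x ∈ I, x ∈ (PySem.Dict.mk graph).keys) →
      (∀ x ∈ stack, x ∈ I) →
      (∀ v, v ∉ I → ¬ CondB graph
        (I.filter (fun x => !(stack.contains x))) v) →
      (∀ x ∈ I, x ∈ bLoop (PySem.Dict.mk graph) (bFollowers (PySem.Dict.mk graph)) I stack) ∧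
      (∀ x ∈ bLoop (PySem.Dict.mk graph) (bFollowers (PySem.Dict.mk graph)) I stack,
        Reach graph influencers x) ∧
      (∀ v, v ∉ bLoop (PySem.Dict.mk graph) (bFollowers (PySem.Dict.mk graph)) I stack →
        ¬ CondB graph (bLoop (PySem.Dict.mk graph) (bFollowers (PySem.Dict.mk graph)) I stack) v) := by
  intro n
  induction n using Nat.strong_induction_on with
  | _ n ihn =>
    intro I stack hn hR hK hst hD
    cases stack with
    | nil =>
      have hunf : bLoop (PySem.Dict.mk graph) (bFollowers (PySem.Dict.mk graph)) I [] = I := by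
        rw [bLoop]
      rw [hunf]
      refine ⟨fun x hx => hx, hR, ?_⟩
      intro v hv
      have hfilt : I.filter (fun x => !(List.contains ([] : List String) x)) = I := by
        refine List.filter_eq_self.mpr (fun a _ => ?_)
        rfl
      have := hD v hv
      rw [hfilt] at this
      exact this
    | cons u rest =>
      have hunf : bLoop (PySem.Dict.mk graph) (bFollowers (PySem.Dict.mk graph)) I (u :: rest) =
          bLoop (PySem.Dict.mk graph) (bFollowers (PySem.Dict.mk graph))
            (((bFollowers (PySem.Dict.mk graph)).getD u []).foldl
              (bScanStep (PySem.Dict.mk graph)) (I, rest)).1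
            (((bFollowers (PySem.Dict.mk graph)).getD u []).foldl
              (bScanStep (PySem.Dict.mk graph)) (I, rest)).2 := by
        rw [bLoop]
      have hL : ∀ v ∈ (bFollowers (PySem.Dict.mk graph)).getD u [],
          v ∈ (PySem.Dict.mk graph).keys ∧ NB graph v ≠ [] := by
        intro v hv
        obtain ⟨h1, h2, _⟩ := (followers_mem graph u v).mp hv
        exact ⟨h1, List.ne_nil_of_mem h2⟩
      have hPI : ∀ x ∈ I.filter (fun x => !(rest.contains x)), x ∈ I :=
        fun x hx => (List.mem_filter.mp hx).1
      obtain ⟨c1, c2, c3, c4, c5, c6⟩ := bScan_props graph influencers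
        (I.filter (fun x => !(rest.contains x)))
        ((bFollowers (PySem.Dict.mk graph)).getD u []) hL I rest hPI hR hK
      set r := ((bFollowers (PySem.Dict.mk graph)).getD u []).foldl
        (bScanStep (PySem.Dict.mk graph)) (I, rest) with hr
      have hst' : ∀ x ∈ r.2, x ∈ r.1 := by
        intro x hx
        rcases (c5 x).mp hx with h | h
        · exact c1 x (hst x (List.mem_cons_of_mem _ h))
        · exact h.1
      have hD' : ∀ v, v ∉ r.1 →
          ¬ CondB graph (r.1.filter (fun x => !(r.2.contains x))) v := by
        intro v hv
        have hvI : v ∉ I := fun h => hv (c1 v h)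
        have hQP : ∀ x ∈ r.1.filter (fun x => !(r.2.contains x)),
            x ∈ I.filter (fun x => !(rest.contains x)) := by
          intro x hx
          obtain ⟨hx1, hx2⟩ := List.mem_filter.mp hx
          have hxn2 : x ∉ r.2 := by
            simp only [Bool.not_eq_true', List.contains_eq_mem, decide_eq_false_iff_not] at hx2
            exact hx2
          have hnot : ¬(x ∈ rest ∨ (x ∈ r.1 ∧ x ∉ I)) := fun hor => hxn2 ((c5 x).mpr hor)
          have hnr : x ∉ rest := fun h => hnot (Or.inl h)
          have hni : x ∈ I := by
            by_cases hxi : x ∈ I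
            · exact hxi
            · exact absurd (Or.inr ⟨hx1, hxi⟩) hnot
          refine List.mem_filter.mpr ⟨hni, ?_⟩
          simp only [Bool.not_eq_true', List.contains_eq_mem, decide_eq_false_iff_not]
          exact hnr
        by_cases hvL : v ∈ (bFollowers (PySem.Dict.mk graph)).getD u []
        · intro hcd
          exact c6 v hvL hv (condB_mono hQP hcd)
        · intro hcd
          refine hD v hvI ?_
          have hcdP : CondB graph (I.filter (fun x => !(rest.contains x))) v :=
            condB_mono hQP hcd
          by_cases hu : u ∈ NB graph v
          · by_cases hvk : v ∈ (PySem.Dict.mk graph).keys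
            · exact absurd ((followers_mem graph u v).mpr
                ⟨hvk, hu, mem_keySet.mpr (hK u (hst u List.mem_cons_self))⟩) hvL
            · exfalso
              have hnb : NB graph v = [] := by
                show (PySem.Dict.mk graph).getD v [] = []
                rw [PySem.Dict.getD_eq_get?_getD,
                  (PySem.Dict.get?_eq_none_iff_not_mem_keys _ _).mpr hvk]
                rfl
              exact hcdP.1 hnb
          · obtain ⟨hne, hlen⟩ := hcdP
            refine ⟨hne, ?_⟩
            have hcnt : List.countP
                (fun f => (I.filter (fun x => !(rest.contains x))).contains f)
                (NB graph v) =
                List.countP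
                (fun f => (I.filter (fun x => !((u :: rest).contains x))).contains f)
                (NB graph v) := by
              refine List.countP_congr (fun f hf => ?_)
              have hfu : f ≠ u := fun h => hu (h ▸ hf)
              simp only [List.contains_eq_mem, decide_eq_true_eq, List.mem_filter,
                Bool.not_eq_true', decide_eq_false_iff_not, List.mem_cons]
              constructor
              · rintro ⟨h1, h2⟩
                exact ⟨h1, fun hor => hor.elim hfu h2⟩
              · rintro ⟨h1, h2⟩
                exact ⟨h1, fun hm => h2 (Or.inr hm)⟩
            omega
      have hmlt : 2 * (bUniv (bFollowers (PySem.Dict.mk graph))).countP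
          (fun x => !(PySem.Set.contains r.1 x)) + r.2.length < n := by
        have hm : 2 * (bUniv (bFollowers (PySem.Dict.mk graph))).countP
            (fun x => !(PySem.Set.contains r.1 x)) + r.2.length ≤
            2 * (bUniv (bFollowers (PySem.Dict.mk graph))).countP
            (fun x => !(PySem.Set.contains I x)) + rest.length := by
          rw [hr]
          exact bScan_measure (PySem.Dict.mk graph) (bUniv (bFollowers (PySem.Dict.mk graph)))
            (PySem.Set.nodup_ofList _) ((bFollowers (PySem.Dict.mk graph)).getD u [])
            (I, rest) (fun v hv => mem_bUniv_of_mem_getD _ hv)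
        rw [← hn]
        simp only [List.length_cons]
        omega
      obtain ⟨d1, d2, d3⟩ := ihn _ hmlt r.1 r.2 rfl c3 c4 hst' hD'
      rw [hunf]
      exact ⟨fun x hx => d1 x (c1 x hx), d2, d3⟩

-- the seed loop of port B
theorem bInit_mem (influencers : List String) :
    ∀ (l : List String) (s : PySem.Set String) (st : List String) (x : String),
      (x ∈ (l.foldl (fun (p : PySem.Set String × List String) node =>
          if influencers.contains node then (PySem.Set.add p.1 node, node :: p.2) else p)
          (s, st)).1 ↔ x ∈ s ∨ (x ∈ l ∧ influencers.contains x = true)) ∧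
      (x ∈ (l.foldl (fun (p : PySem.Set String × List String) node =>
          if influencers.contains node then (PySem.Set.add p.1 node, node :: p.2) else p)
          (s, st)).2 ↔ x ∈ st ∨ (x ∈ l ∧ influencers.contains x = true)) := by
  intro l
  induction l with
  | nil =>
    intro s st x
    constructor
    · constructor
      · exact fun h => Or.inl h
      · rintro (h | ⟨h1, _⟩)
        · exact h
        · cases h1
    · constructor
      · exact fun h => Or.inl h
      · rintro (h | ⟨h1, _⟩)
        · exact h
        · cases h1
  | cons n rest ih =>
    intro s st x
    simp only [List.foldl_cons]
    by_cases hn : influencers.contains n = true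
    · rw [if_pos hn]
      constructor
      · rw [(ih (PySem.Set.add s n) (n :: st) x).1, PySem.Set.mem_add]
        simp only [List.mem_cons]
        constructor
        · rintro ((h | h) | ⟨h1, h2⟩)
          · exact Or.inl h
          · exact Or.inr ⟨Or.inl h, h ▸ hn⟩
          · exact Or.inr ⟨Or.inr h1, h2⟩
        · rintro (h | ⟨h1 | h1, h2⟩)
          · exact Or.inl (Or.inl h)
          · exact Or.inl (Or.inr h1)
          · exact Or.inr ⟨h1, h2⟩
      · rw [(ih (PySem.Set.add s n) (n :: st) x).2]
        simp only [List.mem_cons]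
        constructor
        · rintro ((h | h) | ⟨h1, h2⟩)
          · exact Or.inr ⟨Or.inl h, h ▸ hn⟩
          · exact Or.inl h
          · exact Or.inr ⟨Or.inr h1, h2⟩
        · rintro (h | ⟨h1 | h1, h2⟩)
          · exact Or.inl (Or.inr h)
          · exact Or.inl (Or.inl h1)
          · exact Or.inr ⟨h1, h2⟩
    · rw [if_neg hn]
      constructor
      · rw [(ih s st x).1]
        simp only [List.mem_cons]
        constructor
        · rintro (h | ⟨h1, h2⟩)
          · exact Or.inl h
          · exact Or.inr ⟨Or.inr h1, h2⟩
        · rintro (h | ⟨h1 | h1, h2⟩)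
          · exact Or.inl h
          · exact absurd (h1 ▸ h2) hn
          · exact Or.inr ⟨h1, h2⟩
      · rw [(ih s st x).2]
        simp only [List.mem_cons]
        constructor
        · rintro (h | ⟨h1, h2⟩)
          · exact Or.inl h
          · exact Or.inr ⟨Or.inr h1, h2⟩
        · rintro (h | ⟨h1 | h1, h2⟩)
          · exact Or.inl h
          · exact absurd (h1 ▸ h2) hn
          · exact Or.inr ⟨h1, h2⟩

-- ---------- assembling the two sides ----------

theorem ofList_filter (q : String → Bool) :
    ∀ (xs : List String),
      PySem.Set.ofList (xs.filter q) = (PySem.Set.ofList xs).filter q := by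
  intro xs
  induction xs with
  | nil => rfl
  | cons x xs ih =>
    rw [List.filter_cons, PySem.Set.ofList_cons, List.filter_cons]
    by_cases hq : q x = true
    · rw [if_pos hq, if_pos hq, PySem.Set.ofList_cons, ih]
      have hcomm : PySem.Set.discard ((PySem.Set.ofList xs).filter q) x =
          (PySem.Set.discard (PySem.Set.ofList xs) x).filter q := by
        simp only [PySem.Set.discard]
        exact List.filter_comm _ _ _
      rw [hcomm]
    · rw [if_neg hq, if_neg hq, ih]
      have hcomm : (PySem.Set.discard (PySem.Set.ofList xs) x).filter q =
          PySem.Set.discard ((PySem.Set.ofList xs).filter q) x := by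
        simp only [PySem.Set.discard]
        exact (List.filter_comm _ _ _).symm
      rw [hcomm]
      refine (List.filter_eq_self.mpr ?_).symm
      intro a ha
      have hqa : q a = true := (List.mem_filter.mp ha).2
      have hax : a ≠ x := fun h => hq (h ▸ hqa)
      simp [hax]

-- the seed state and final influenced set of port B
def BInit (graph : List (String × List String)) (influencers : List String) :
    PySem.Set String × List String :=
  (PySem.Dict.mk graph).keys.foldl (fun (p : PySem.Set String × List String) node =>
    if influencers.contains node then (PySem.Set.add p.1 node, node :: p.2) else p)
    (PySem.Set.empty, [])

def BFin (graph : List (String × List String)) (influencers : List String) :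
    PySem.Set String :=
  bLoop (PySem.Dict.mk graph) (bFollowers (PySem.Dict.mk graph))
    (BInit graph influencers).1 (BInit graph influencers).2

theorem bOut_eq (graph : List (String × List String)) (influencers : List String) :
    all_influenced_alt graph influencers =
      PySem.Set.ofList ((PySem.Dict.mk graph).keys.filter
        (fun node => PySem.Set.contains (BFin graph influencers) node)) := rfl

theorem bInit_fst (graph : List (String × List String)) (influencers : List String)
    (x : String) :
    x ∈ (BInit graph influencers).1 ↔
      x ∈ (PySem.Dict.mk graph).keys ∧ influencers.contains x = true := by
  have h := (bInit_mem influencers (PySem.Dict.mk graph).keys PySem.Set.empty [] x).1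
  rw [show (BInit graph influencers).1 =
    ((PySem.Dict.mk graph).keys.foldl (fun (p : PySem.Set String × List String) node =>
      if influencers.contains node then (PySem.Set.add p.1 node, node :: p.2) else p)
      (PySem.Set.empty, [])).1 from rfl, h]
  constructor
  · rintro (h1 | h1)
    · cases h1
    · exact h1
  · exact fun h1 => Or.inr h1

theorem bInit_snd (graph : List (String × List String)) (influencers : List String)
    (x : String) :
    x ∈ (BInit graph influencers).2 ↔
      x ∈ (PySem.Dict.mk graph).keys ∧ influencers.contains x = true := by
  have h := (bInit_mem influencers (PySem.Dict.mk graph).keys PySem.Set.empty [] x).2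
  rw [show (BInit graph influencers).2 =
    ((PySem.Dict.mk graph).keys.foldl (fun (p : PySem.Set String × List String) node =>
      if influencers.contains node then (PySem.Set.add p.1 node, node :: p.2) else p)
      (PySem.Set.empty, [])).2 from rfl, h]
  constructor
  · rintro (h1 | h1)
    · cases h1
    · exact h1
  · exact fun h1 => Or.inr h1

theorem bReach_iff (graph : List (String × List String)) (influencers : List String)
    (k : String) :
    k ∈ BFin graph influencers ↔ Reach graph influencers k := by
  have hR0 : ∀ x ∈ (BInit graph influencers).1, Reach graph influencers x := by
    intro x hx
    obtain ⟨h1, h2⟩ := (bInit_fst graph influencers x).mp hx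
    exact Reach.seed x h1 h2
  have hK0 : ∀ x ∈ (BInit graph influencers).1, x ∈ (PySem.Dict.mk graph).keys :=
    fun x hx => ((bInit_fst graph influencers x).mp hx).1
  have hst0 : ∀ x ∈ (BInit graph influencers).2, x ∈ (BInit graph influencers).1 :=
    fun x hx => (bInit_fst graph influencers x).mpr ((bInit_snd graph influencers x).mp hx)
  have hD0 : ∀ v, v ∉ (BInit graph influencers).1 →
      ¬ CondB graph ((BInit graph influencers).1.filter
        (fun x => !((BInit graph influencers).2.contains x))) v := by
    intro v _
    have hfe : (BInit graph influencers).1.filter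
        (fun x => !((BInit graph influencers).2.contains x)) = [] := by
      refine List.filter_eq_nil_iff.mpr (fun a ha => ?_)
      have hmem : a ∈ (BInit graph influencers).2 :=
        (bInit_snd graph influencers a).mpr ((bInit_fst graph influencers a).mp ha)
      simp [List.contains_eq_mem, hmem]
    rw [hfe]
    rintro ⟨hne, hlen⟩
    have hz : List.countP (fun f => (([] : List String)).contains f) (NB graph v) = 0 := by
      refine List.countP_eq_zero.mpr (fun a _ => ?_)
      simp
    rw [hz] at hlen
    exact hne (List.eq_nil_of_length_eq_zero (by omega))
  obtain ⟨e1, e2, e3⟩ := bLoop_props graph influencers _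
    (BInit graph influencers).1 (BInit graph influencers).2 rfl hR0 hK0 hst0 hD0
  constructor
  · exact fun h => e2 k h
  · intro hr
    induction hr with
    | seed k hk1 hk2 => exact e1 k ((bInit_fst graph influencers k).mpr ⟨hk1, hk2⟩)
    | step k I hk1 hI hcond ih =>
      by_contra hkn
      exact e3 k hkn (condB_mono (fun x hx => ih x hx) hcond)

-- ===== VERDICT (by name: the statement is the Claim_ definition above) =====
theorem all_influenced_spec : Claim_equal_all_influenced := by
  unfold Claim_equal_all_influenced
  intro graph influencers _
  unfold Spec_all_influenced
  rw [aOut_eq graph influencers, bOut_eq graph influencers, ofList_filter]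
  refine List.filter_congr ?_
  intro x _
  rw [Bool.eq_iff_iff, beq_iff_eq, aReach_iff graph influencers x]
  exact Iff.symm ((PySem.Set.contains_iff _ _).trans (bReach_iff graph influencers x))
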